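-- pv_equiv track=rewrite | github.com/DanielDePaulaPorto/CIC-EstruturaDeDados | Exemplos/Recursao/CocaCola.py | tomarCocaColaGelada
-- ===== SOURCE A (Python) =====
-- def tomarCocaColaGelada(garrafasVazias):
--     if garrafasVazias <2:
--         return 0
--     elif garrafasVazias == 2:
--         return 1
--     else:
--         bebidas = garrafasVazias // 3
--         sobra = garrafasVazias % 3
--         return bebidas + tomarCocaColaGelada(bebidas+sobra)
-- ===== SOURCE B (Python) =====
-- def tomarCocaColaGelada(garrafasVazias):
--     # Closed form: each coke drunk costs a net 2 empty bottles (3 in, 1 back),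
--     # and the ==2 special case lets the last coke be bought with only 2 bottles,
--     # so the answer is floor(garrafasVazias / 2) for any count >= 2.
--     if garrafasVazias < 2:
--         return 0
--     return garrafasVazias // 2
-- ===== Notes on version B (the rewrite author's own statement) =====
-- stated objective: simpler
-- what changed: Replaced the divide-and-carry recursion by the closed form floor(garrafasVazias/2) (each coke costs a net two bottles; the two-bottle rule spends the last pair), proved equal for all ints.
import Mathlib
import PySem

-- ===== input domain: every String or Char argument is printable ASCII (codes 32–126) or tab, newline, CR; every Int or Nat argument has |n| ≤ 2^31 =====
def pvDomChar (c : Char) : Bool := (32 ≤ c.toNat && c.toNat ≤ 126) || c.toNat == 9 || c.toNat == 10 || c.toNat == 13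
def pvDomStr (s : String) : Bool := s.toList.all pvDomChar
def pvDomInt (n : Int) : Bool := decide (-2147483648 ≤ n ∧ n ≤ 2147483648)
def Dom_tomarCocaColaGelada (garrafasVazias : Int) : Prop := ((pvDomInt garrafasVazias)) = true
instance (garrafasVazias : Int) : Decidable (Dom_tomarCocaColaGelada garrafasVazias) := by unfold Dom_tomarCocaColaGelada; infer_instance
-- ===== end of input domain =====

-- B replaces A's divide-and-carry recursion by the closed form floor(n/2); proved equal on all ints (objective: simpler).
-- ===== PORT A =====
def tomarCocaColaGelada (garrafasVazias : Int) : Int :=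
  if garrafasVazias < 2 then 0
  else if garrafasVazias = 2 then 1
  else
    let bebidas := PySem.Int.floordiv garrafasVazias 3
    let sobra := PySem.Int.mod garrafasVazias 3
    bebidas + tomarCocaColaGelada (bebidas + sobra)
termination_by garrafasVazias.toNat
decreasing_by
  rename_i h1 h2
  have h3 : (3:Int) > 0 := by norm_num
  rw [PySem.Int.floordiv_eq_ediv_of_pos h3, PySem.Int.mod_eq_emod_of_pos h3]
  omega

-- ===== PORT B =====
def tomarCocaColaGelada_alt (garrafasVazias : Int) : Int :=
  if garrafasVazias < 2 then 0
  else PySem.Int.floordiv garrafasVazias 2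

-- ===== PRECONDITION & SPEC =====
def Spec_tomarCocaColaGelada (garrafasVazias : Int) (out : Int) : Prop := out = tomarCocaColaGelada_alt garrafasVazias
instance (garrafasVazias : Int) (out : Int) : Decidable (Spec_tomarCocaColaGelada garrafasVazias out) := by unfold Spec_tomarCocaColaGelada; infer_instance

-- ===== CLAIM (what is proved, stated in full; the proofs are below) =====
def Claim_equal_tomarCocaColaGelada : Prop := ∀ (garrafasVazias : Int), Dom_tomarCocaColaGelada garrafasVazias → Spec_tomarCocaColaGelada garrafasVazias (tomarCocaColaGelada garrafasVazias)

-- ===== LEMMAS AND PROOFS =====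

-- ===== VERDICT (by name: the statement is the Claim_ definition above) =====
theorem tomarCocaColaGelada_eq_alt_bounded (k : Nat) :
    ∀ (n : Int), n.toNat ≤ k → tomarCocaColaGelada n = tomarCocaColaGelada_alt n := by
  induction k with
  | zero =>
    intro n hn
    have hlt : n < 2 := by omega
    rw [tomarCocaColaGelada, tomarCocaColaGelada_alt, if_pos hlt, if_pos hlt]
  | succ k ih =>
    intro n hn
    by_cases h1 : n < 2
    · rw [tomarCocaColaGelada, tomarCocaColaGelada_alt, if_pos h1, if_pos h1]
    · by_cases h2 : n = 2
      · subst h2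
        rw [tomarCocaColaGelada, tomarCocaColaGelada_alt]
        norm_num [PySem.Int.floordiv]
      · have h3 : (3:Int) > 0 := by norm_num
        have h2' : (2:Int) > 0 := by norm_num
        have hq := PySem.Int.floordiv_eq_ediv_of_pos (a := n) h3
        have hr := PySem.Int.mod_eq_emod_of_pos (a := n) h3
        rw [tomarCocaColaGelada, if_neg h1, if_neg h2]
        show PySem.Int.floordiv n 3 +
            tomarCocaColaGelada (PySem.Int.floordiv n 3 + PySem.Int.mod n 3) =
          tomarCocaColaGelada_alt n
        have hrec := ih (PySem.Int.floordiv n 3 + PySem.Int.mod n 3) (by rw [hq, hr]; omega)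
        rw [hrec, tomarCocaColaGelada_alt, tomarCocaColaGelada_alt, if_neg h1]
        rw [hq, hr, PySem.Int.floordiv_eq_ediv_of_pos h2',
          PySem.Int.floordiv_eq_ediv_of_pos h2']
        split <;> omega

theorem tomarCocaColaGelada_spec : Claim_equal_tomarCocaColaGelada := by
  intro n _
  unfold Spec_tomarCocaColaGelada
  exact tomarCocaColaGelada_eq_alt_bounded n.toNat n le_rfl
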